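-- pv_equiv track=rewrite | github.com/xKonnichiwa/video_annot_project | ml/clastering_clasters.py | merge_clusters_if_needed
-- ===== SOURCE A (Python) =====
-- def merge_clusters_if_needed(clusters):
--     """
--     Функция для объединения мелких кластеров (если их длина меньше заданного порога) с соседними кластерами.
--
--     Аргументы:
--     clusters — список кластеров, где каждый кластер представлен списком шотов.
--                Например: [['shot_1', 'shot_2'], ['shot_10'], ['shot_15', 'shot_16']].
--
--     Возвращает:
--     clusters — список объединенных кластеров, если выполнение объединения было необходимо.
--                Например: [['shot_1', 'shot_2', 'shot_10'], ['shot_15', 'shot_16']].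
--     """
--
--     changed = True  # Флаг для отслеживания изменений (проверяет, были ли объединения в текущем цикле)
--
--     # --- Основной цикл для объединения мелких кластеров ---
--
--     while changed:  # Повторяем, пока есть изменения
--         changed = False  # Сбрасываем флаг перед началом нового цикла
--         new_clusters = []  # Список для хранения новых объединенных кластеров
--         skip_next = False  # Флаг для пропуска следующего кластера, если он уже объединен
--
--         # --- Проход по всем кластерам, кроме последнего ---
--
--         for i in range(len(clusters) - 1):
--             # Если флаг `skip_next` установлен, пропускаем текущий элемент, так как он уже был объединен
--             if skip_next:
--                 skip_next = False
--                 continue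
--
--             # Текущий и следующий кластеры
--             current_cluster = clusters[i]
--             next_cluster = clusters[i + 1]
--
--             # --- Проверка на возможность объединения ---
--
--             # Объединяем, если оба кластера имеют меньше 4 элементов
--             if len(current_cluster) < 4 and len(next_cluster) < 4:
--                 # Объединение текущего и следующего кластеров
--                 merged_cluster = current_cluster + next_cluster  # Конкатенация списков шотов
--                 new_clusters.append(merged_cluster)  # Добавляем объединенный кластер в новый список
--                 skip_next = True  # Устанавливаем флаг, чтобы пропустить следующий элемент
--                 changed = True  # Устанавливаем флаг изменений, так как было произведено объединение
--             else:
--                 # Если объединение не требуется, добавляем текущий кластер как есть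
--                 new_clusters.append(current_cluster)
--
--         # --- Добавление последнего кластера, если он не был объединен ---
--
--         # Если последний элемент не был объединен с предыдущим, добавляем его в новый список
--         if not skip_next and len(clusters) > 0:
--             new_clusters.append(clusters[-1])
--
--         # Обновляем список кластеров после текущего цикла
--         clusters = new_clusters  # Обновляем исходный список для следующей итерации цикла
--
--     # --- Возвращение итогового списка кластеров ---
--
--     return clusters  # Возвращаем новый список объединенных кластеров
-- ===== SOURCE B (Python) =====
-- def merge_clusters_if_needed(clusters):
--     """Same result as A: split at big (>=4) barrier clusters, which are never
--     merged, and resolve each run of small clusters locally by pairwise halving."""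
--
--     def pair_up(run):
--         # one merging pass over an all-small run: merge adjacent pairs two at a time
--         out = []
--         i = 0
--         while i + 1 < len(run):
--             out.append(run[i] + run[i + 1])
--             i += 2
--         if i < len(run):
--             out.append(run[i])
--         return out
--
--     def resolve(run):
--         # fully merge a run whose clusters are all small (< 4 shots)
--         if len(run) < 2:
--             return run
--         return split_resolve(pair_up(run))
--
--     def split_resolve(items):
--         # split at big clusters (barriers, never merged) and resolve each small run
--         out, seg = [], []
--         for c in items:
--             if len(c) < 4:
--                 seg.append(c)
--             else:
--                 out.extend(resolve(seg))
--                 out.append(c)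
--                 seg = []
--         out.extend(resolve(seg))
--         return out
--
--     return split_resolve(clusters)
-- ===== Notes on version B (the rewrite author's own statement) =====
-- stated objective: alternative
-- what changed: A repeatedly rescans the whole cluster list pass after pass until no merge happens; B makes one sweep that splits the list at big (>=4) clusters, which are never merged, and resolves each run of small clusters locally by recursive pairwise halving, so stable regions are never revisited.
import Mathlib
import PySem

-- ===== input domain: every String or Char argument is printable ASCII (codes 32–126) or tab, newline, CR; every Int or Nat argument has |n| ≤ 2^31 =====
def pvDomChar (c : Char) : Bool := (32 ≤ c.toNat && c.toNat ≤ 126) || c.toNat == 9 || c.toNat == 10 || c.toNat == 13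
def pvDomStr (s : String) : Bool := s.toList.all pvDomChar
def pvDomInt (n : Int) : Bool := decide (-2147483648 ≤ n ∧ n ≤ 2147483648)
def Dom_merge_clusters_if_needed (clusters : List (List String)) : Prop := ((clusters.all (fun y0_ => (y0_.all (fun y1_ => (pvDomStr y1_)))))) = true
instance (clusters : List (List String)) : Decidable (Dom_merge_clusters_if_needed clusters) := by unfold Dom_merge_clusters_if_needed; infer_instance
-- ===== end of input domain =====

-- B replaces A's repeated global passes over the whole list by a single split at big (≥4) clusters
-- with local pairwise-halving resolution of each run of small clusters (objective: alternative).

-- ===== PORT A =====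
-- One pass of A's inner `for` loop: the index/skip_next loop rendered as the obvious
-- two-at-a-time structural recursion over the same state (new_clusters, changed);
-- the trailing `if not skip_next` append is the [c] case.
def passA : List (List String) → List (List String) × Bool
  | [] => ([], false)
  | [c] => ([c], false)
  | a :: b :: r =>
    if a.length < 4 ∧ b.length < 4 then
      ((a ++ b) :: (passA r).1, true)
    else
      (a :: (passA (b :: r)).1, (passA (b :: r)).2)

-- termination facts for A's while-loop (cited by its decreasing_by)
theorem passA_len : ∀ l : List (List String), (passA l).1.length ≤ l.length
  | [] => by simp [passA]
  | [c] => by simp [passA]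
  | a :: b :: r => by
    simp only [passA]
    split
    · have := passA_len r; simp; omega
    · have := passA_len (b :: r); simp at this ⊢; omega

theorem passA_progress : ∀ l : List (List String), (passA l).2 = true → (passA l).1.length < l.length
  | [] => by simp [passA]
  | [c] => by simp [passA]
  | a :: b :: r => by
    simp only [passA]
    split
    · intro _; have := passA_len r; simp; omega
    · intro h; simp at h
      have := passA_progress (b :: r) h; simp at this ⊢; omega

-- A's `while changed` loop
def merge_clusters_if_needed (clusters : List (List String)) : List (List String) :=
  if h : (passA clusters).2 = true then merge_clusters_if_needed (passA clusters).1
  else (passA clusters).1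
termination_by clusters.length
decreasing_by exact passA_progress clusters h

-- ===== PORT B =====
-- one merging pass over an all-small run: merge adjacent pairs two at a time
def pairUpB : List (List String) → List (List String)
  | [] => []
  | [c] => [c]
  | a :: b :: r => (a ++ b) :: pairUpB r

-- resolveB = Source B's `resolve`, srAux = Source B's `split_resolve` (its for-loop with the
-- (out, seg) accumulators); the Nat argument is fuel that only makes the mutual
-- recursion total — Source B's recursion terminates on its own, fuel = list length suffices.
mutual
def resolveB : Nat → List (List String) → List (List String)
  | 0, run => run
  | f + 1, run => if run.length < 2 then run else srAux f [] (pairUpB run)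
termination_by f run => (f, 0)

def srAux : Nat → List (List String) → List (List String) → List (List String)
  | f, seg, [] => resolveB f seg
  | f, seg, c :: r =>
    if c.length < 4 then srAux f (seg ++ [c]) r
    else resolveB f seg ++ c :: srAux f [] r
termination_by f seg l => (f, l.length + 1)
end

def merge_clusters_if_needed_alt (clusters : List (List String)) : List (List String) :=
  srAux clusters.length [] clusters

-- ===== PRECONDITION & SPEC =====
def Spec_merge_clusters_if_needed (clusters : List (List String)) (out : List (List String)) : Prop := out = merge_clusters_if_needed_alt clusters
instance (clusters : List (List String)) (out : List (List String)) : Decidable (Spec_merge_clusters_if_needed clusters out) := by unfold Spec_merge_clusters_if_needed; infer_instance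

-- ===== CLAIM (what is proved, stated in full; the proofs are below) =====
def Claim_equal_merge_clusters_if_needed : Prop := ∀ (clusters : List (List String)), Dom_merge_clusters_if_needed clusters → Spec_merge_clusters_if_needed clusters (merge_clusters_if_needed clusters)

-- ===== LEMMAS AND PROOFS =====

-- a pass that reports no change returned its input
theorem passA_unchanged : ∀ l : List (List String), (passA l).2 = false → (passA l).1 = l
  | [] => by simp [passA]
  | [c] => by simp [passA]
  | a :: b :: r => by
    simp only [passA]
    split
    · simp
    · intro h; simp at h ⊢; exact passA_unchanged (b :: r) h

theorem pairUpB_le : ∀ l : List (List String), (pairUpB l).length ≤ l.length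
  | [] => by simp [pairUpB]
  | [c] => by simp [pairUpB]
  | a :: b :: r => by simp only [pairUpB]; have := pairUpB_le r; simp; omega

theorem pairUpB_lt : ∀ l : List (List String), 2 ≤ l.length → (pairUpB l).length < l.length
  | [] => by simp
  | [c] => by simp
  | a :: b :: r => by
    intro _; simp only [pairUpB]; have := pairUpB_le r; simp; omega

-- on an all-small run a pass is exactly pairwise merging, and it changes iff length ≥ 2
theorem passA_small : ∀ l : List (List String), (∀ c ∈ l, c.length < 4) →
    passA l = (pairUpB l, decide (2 ≤ l.length))
  | [] => by simp [passA, pairUpB]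
  | [c] => by simp [passA, pairUpB]
  | a :: b :: r => by
    intro h
    have ha : a.length < 4 := h a (by simp)
    have hb : b.length < 4 := h b (by simp)
    have hr : ∀ c ∈ r, c.length < 4 := fun c hc => h c (by simp [hc])
    rw [passA, if_pos ⟨ha, hb⟩, pairUpB, passA_small r hr]
    simp

-- a big cluster is a barrier: a pass acts independently on the two sides
theorem passA_barrier : ∀ (xs : List (List String)) (b : List String) (ys : List (List String)),
    4 ≤ b.length →
    passA (xs ++ b :: ys) = ((passA xs).1 ++ b :: (passA ys).1, (passA xs).2 || (passA ys).2)
  | [], b, ys => by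
    intro hb
    cases ys with
    | nil => simp [passA]
    | cons y ys' =>
      have : ¬ (b.length < 4 ∧ y.length < 4) := by omega
      simp [passA, if_neg this]
  | [x], b, ys => by
    intro hb
    have : ¬ (x.length < 4 ∧ b.length < 4) := by omega
    simp only [List.cons_append, List.nil_append, passA, if_neg this]
    have h0 := passA_barrier [] b ys hb
    simp only [List.nil_append] at h0
    rw [h0]
    simp [passA]
  | x1 :: x2 :: xs', b, ys => by
    intro hb
    simp only [List.cons_append, passA]
    by_cases h : x1.length < 4 ∧ x2.length < 4
    · rw [if_pos h, if_pos h]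
      rw [show xs' ++ b :: ys = xs' ++ b :: ys from rfl, passA_barrier xs' b ys hb]
      simp
  -- the recursive call on x2 :: xs' is shorter
    · rw [if_neg h, if_neg h]
      rw [show x2 :: (xs' ++ b :: ys) = (x2 :: xs') ++ b :: ys from rfl,
          passA_barrier (x2 :: xs') b ys hb]
      simp
termination_by xs _ _ => xs.length

-- one-step unfoldings of A's while-loop
theorem loopA_step (l : List (List String)) (h : (passA l).2 = true) :
    merge_clusters_if_needed l = merge_clusters_if_needed (passA l).1 := by
  rw [merge_clusters_if_needed]; rw [dif_pos h]

theorem loopA_done (l : List (List String)) (h : (passA l).2 = false) :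
    merge_clusters_if_needed l = l := by
  rw [merge_clusters_if_needed]; rw [dif_neg (by simp [h]), passA_unchanged l h]

-- barriers persist through the whole while-loop
theorem loopA_barrier : ∀ (xs : List (List String)) (b : List String) (ys : List (List String)),
    4 ≤ b.length →
    merge_clusters_if_needed (xs ++ b :: ys) =
      merge_clusters_if_needed xs ++ b :: merge_clusters_if_needed ys := by
  intro xs b ys hb
  have hcomb := passA_barrier xs b ys hb
  cases hx : (passA xs).2 <;> cases hy : (passA ys).2
  · -- no change on either side
    rw [loopA_done _ (by rw [hcomb]; simp [hx, hy]), loopA_done xs hx, loopA_done ys hy]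
  all_goals
    have hch : (passA (xs ++ b :: ys)).2 = true := by rw [hcomb]; simp [hx, hy]
    rw [loopA_step _ hch, hcomb]
    rw [loopA_barrier (passA xs).1 b (passA ys).1 hb]
  · rw [passA_unchanged xs hx, loopA_step ys hy]
  · rw [loopA_step xs hx, passA_unchanged ys hy]
  · rw [loopA_step xs hx, loopA_step ys hy]
termination_by xs b ys => xs.length + ys.length
decreasing_by
  all_goals
    first
      | (have h1 := passA_len xs; have h2 := passA_progress ys hy; omega)
      | (have h1 := passA_progress xs hx; have h2 := passA_len ys; omega)

-- main mutual induction: the while-loop equals B's local resolution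
mutual
theorem loopA_eq_resolve : ∀ (f : Nat) (run : List (List String)),
    run.length ≤ f → (∀ c ∈ run, c.length < 4) →
    merge_clusters_if_needed run = resolveB f run
  | f, [] => by
    intro _ _
    rw [loopA_done [] (by simp [passA])]
    cases f <;> simp [resolveB]
  | f, [c] => by
    intro _ _
    rw [loopA_done [c] (by simp [passA])]
    cases f <;> simp [resolveB]
  | f, a :: b :: r => by
    intro hf hs
    have h2 : 2 ≤ (a :: b :: r).length := by simp
    obtain ⟨f', rfl⟩ : ∃ f', f = f' + 1 := ⟨f - 1, by simp at hf; omega⟩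
    have hch : (passA (a :: b :: r)).2 = true := by
      rw [passA_small _ hs]; simp
    rw [loopA_step _ hch, passA_small _ hs]
    have hlt := pairUpB_lt (a :: b :: r) h2
    have hM1 := loopA_eq_sr f' [] (pairUpB (a :: b :: r)) (by simp)
      (by simp only [List.length_cons, List.length_nil] at hf hlt ⊢; omega)
    simp only [List.nil_append] at hM1
    rw [hM1, resolveB, if_neg (by simpa using h2)]
termination_by f run => (f, 0)

theorem loopA_eq_sr : ∀ (f : Nat) (seg l : List (List String)),
    (∀ c ∈ seg, c.length < 4) → seg.length + l.length ≤ f →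
    merge_clusters_if_needed (seg ++ l) = srAux f seg l
  | f, seg, [] => by
    intro hs hf
    rw [List.append_nil, srAux]
    exact loopA_eq_resolve f seg (by simpa using hf) hs
  | f, seg, c :: r => by
    intro hs hf
    by_cases hc : c.length < 4
    · rw [srAux, if_pos hc, show seg ++ c :: r = (seg ++ [c]) ++ r from by simp]
      exact loopA_eq_sr f (seg ++ [c]) r
        (fun x hx => by
          rcases List.mem_append.mp hx with h1 | h1
          · exact hs x h1
          · rw [List.mem_singleton.mp h1]; exact hc)
        (by simp at hf ⊢; omega)
    · rw [srAux, if_neg hc]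
      rw [loopA_barrier seg c r (by omega)]
      rw [loopA_eq_resolve f seg (by simp at hf; omega) hs]
      rw [show r = [] ++ r from rfl, loopA_eq_sr f [] r (by simp) (by simp at hf ⊢; omega)]
      simp
termination_by f seg l => (f, l.length + 1)
end

-- ===== VERDICT (by name: the statement is the Claim_ definition above) =====
theorem merge_clusters_if_needed_spec : Claim_equal_merge_clusters_if_needed := by
  intro clusters _
  unfold Spec_merge_clusters_if_needed merge_clusters_if_needed_alt
  have h := loopA_eq_sr clusters.length [] clusters (by simp) (by simp)
  simpa using h
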